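-- pv_equiv track=rewrite | github.com/qianlima-lab/SpanDLA | utils.py | get_mass
-- ===== SOURCE A (Python) =====
-- def get_mass(seg):
--     res = []
--     cur = 0
--     for i, x in enumerate(seg):
--         if x > 0:
--             res.append((cur, i, x))
--             cur = i + 1
--     return set(res)
-- ===== SOURCE B (Python) =====
-- def get_mass(seg):
--     # phase 1: collect boundary positions (indices with positive value) with their values
--     bounds = [(i, x) for i, x in enumerate(seg) if x > 0]
--     # phase 2: pair each boundary with its predecessor to get the segment start
--     starts = [-1] + [i for i, _ in bounds]
--     return {(p + 1, i, x) for p, (i, x) in zip(starts, bounds)}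
-- ===== Notes on version B (the rewrite author's own statement) =====
-- stated objective: alternative
-- what changed: Replaces the single loop threading a running 'cur' start accumulator by two explicit phases: collect the boundary positions in one pass, then zip that list with a shifted copy to form (prev+1, pos, value) triples.
import Mathlib
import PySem

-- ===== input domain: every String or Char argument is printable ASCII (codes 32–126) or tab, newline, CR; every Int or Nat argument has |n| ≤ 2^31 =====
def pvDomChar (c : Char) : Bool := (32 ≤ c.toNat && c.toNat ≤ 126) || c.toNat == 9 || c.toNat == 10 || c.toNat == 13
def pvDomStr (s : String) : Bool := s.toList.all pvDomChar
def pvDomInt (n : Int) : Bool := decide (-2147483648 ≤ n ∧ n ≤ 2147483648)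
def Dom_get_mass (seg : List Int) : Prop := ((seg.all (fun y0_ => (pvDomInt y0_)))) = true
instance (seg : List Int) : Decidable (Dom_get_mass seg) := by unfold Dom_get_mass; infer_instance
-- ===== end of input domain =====

-- B replaces the running-start accumulator by a boundary-list pass zipped with its shifted copy (alternative decomposition; return value only).


-- ===== PORT A =====
def get_mass (seg : List Int) : List (Int × Int × Int) :=
  PySem.Set.ofList
    ((PySem.List.enumerate seg 0).foldl
      (fun (st : List (Int × Int × Int) × Int) p =>
        if p.2 > 0 then (st.1 ++ [(st.2, p.1, p.2)], p.1 + 1) else st)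
      ([], 0)).1

-- ===== PORT B =====
def get_mass_alt (seg : List Int) : List (Int × Int × Int) :=
  let bounds := (PySem.List.enumerate seg 0).filter (fun p => p.2 > 0)
  let starts := -1 :: bounds.map (fun p => p.1)
  PySem.Set.ofList ((starts.zip bounds).map (fun pq => (pq.1 + 1, pq.2.1, pq.2.2)))

-- ===== PRECONDITION & SPEC =====
def Spec_get_mass (seg : List Int) (out : List (Int × Int × Int)) : Prop := out = get_mass_alt seg
instance (seg : List Int) (out : List (Int × Int × Int)) : Decidable (Spec_get_mass seg out) := by unfold Spec_get_mass; infer_instance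

-- ===== CLAIM (what is proved, stated in full; the proofs are below) =====
def Claim_equal_get_mass : Prop := ∀ (seg : List Int), Dom_get_mass seg → Spec_get_mass seg (get_mass seg)

-- ===== LEMMAS AND PROOFS =====

-- ===== VERDICT (by name: the statement is the Claim_ definition above) =====
-- B's second phase, written as structural recursion for the proof
def gmGo (c : Int) : List (Int × Int) → List (Int × Int × Int)
  | [] => []
  | (i, x) :: t => (c, i, x) :: gmGo (i + 1) t

theorem gm_zip_eq_go (c : Int) (b : List (Int × Int)) :
    (((c - 1) :: b.map (fun p => p.1)).zip b).map
      (fun pq => (pq.1 + 1, pq.2.1, pq.2.2)) = gmGo c b := by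
  induction b generalizing c with
  | nil => rfl
  | cons h t ih =>
    simp only [List.map_cons, List.zip_cons_cons, gmGo]
    rw [show c - 1 + 1 = c from by ring]
    congr 1
    have := ih (h.1 + 1)
    rw [show h.1 + 1 - 1 = h.1 from by ring] at this
    exact this

theorem gm_fold_eq_go (l : List (Int × Int)) (res : List (Int × Int × Int)) (c : Int) :
    (l.foldl
      (fun (st : List (Int × Int × Int) × Int) p =>
        if p.2 > 0 then (st.1 ++ [(st.2, p.1, p.2)], p.1 + 1) else st)
      (res, c)).1 = res ++ gmGo c (l.filter (fun p => p.2 > 0)) := by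
  induction l generalizing res c with
  | nil => simp [gmGo]
  | cons h t ih =>
    by_cases hx : h.2 > 0
    · simp [List.foldl_cons, hx, ih, gmGo]
    · simp [List.foldl_cons, hx, ih]

theorem get_mass_spec : Claim_equal_get_mass := by
  intro seg _
  unfold Spec_get_mass get_mass get_mass_alt
  rw [gm_fold_eq_go]
  have h := gm_zip_eq_go 0 ((PySem.List.enumerate seg 0).filter (fun p => p.2 > 0))
  norm_num at h
  simp [h]
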